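-- pv_equiv track=rewrite | github.com/ibaaj/explainability-of-possibilistic-rule-based-systems | equation-system/main.py | buildDi
-- ===== SOURCE A (Python) =====
-- strmap = {
--     "0": "₀", "1": "₁", "2": "₂", "3": "₃", "4": "₄", "5": "₅", "6": "₆",
--     "7": "₇", "8": "₈", "9": "₉",
--     "lambda": "\u03BB", "alpha": "\u03B1", "beta": "\u03B2", "rho": "\u03C1",
--     "Qbar" : u'Q\u0305', 'bar' : u'\u0305',
--     "in" : 	u"\u2208", "pi" : u"\u03C0", "notequal" : u"\u2260",
--     "tau" : u"\u03C4",
--     "epsilon" : u"\u03B5", "Delta" : u"\u0394"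
--
-- }
--
-- def nbAsStrSub(nb):
--     return ''.join([strmap[c] for c in str(nb)])
--
-- def buildmatrix(matrix,letter1,letter2,n,mode,i = 1):
--     if i == 1:
--         if mode == "uplet":
--             matrix = [(letter1 + nbAsStrSub(1),),(letter2 + nbAsStrSub(1),)]
--         if mode == "func":
--             matrix = [letter1 + nbAsStrSub(1),letter2 + nbAsStrSub(1)]
--     else:
--         matrix1 = []
--         matrix2 = []
--         for x in matrix:
--             l1 = x
--             l2 = x
--             if mode == "uplet":
--                 l1 = l1 + (letter1 + nbAsStrSub(i),)
--                 l2 = l2 + (letter2 + nbAsStrSub(i),)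
--             if mode == "func":
--                 l1 = l1 + letter1 + nbAsStrSub(i)
--                 l2 = l2 + letter2 + nbAsStrSub(i)
--
--             matrix1.append(l1)
--             matrix2.append(l2)
--         matrix = matrix1 + matrix2
--
--     if i == n:
--         return matrix
--     else:
--         return buildmatrix(matrix,letter1,letter2,n,mode,i+1)
--
-- def buildBi(n,x1,y1,x2,y2):
--     m1 = buildmatrix([],x1,y1,n,"uplet")
--     m2 = buildmatrix([],x2,y2,n,"uplet")
--
--     Bi = []
--     for x1,x2 in zip(m1,m2):
--         l = []
--         for y1,y2 in zip(x1,x2):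
--             r = ('max', y1, y2)
--             l.append(r)
--         Bi.append(l.copy())
--     return Bi
--
-- def buildOV(n,x1,y1,x2,y2):
--     Bi = buildBi(n,x1,y1,x2,y2)
--     OV = []
--     for x in Bi:
--         l = ("min",x)
--         OV.append(l)
--     return OV
--
-- def setAlphaBeta(matrix,terminaison):
--     nmatrix = []
--     for x in matrix:
--         l = len(x[1])
--         i = 0
--         c = ("min",)
--         for z in x[1]:
--             if z[1][0] == "s" and z[2][0] == strmap["lambda"]:
--                 c = c + (strmap["alpha"]+terminaison + z[1][1:],)
--             if z[1][0] == "r" and z[2][0] == strmap["rho"]: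
--                 c = c + (strmap["beta"]+terminaison + z[1][1:],)
--             i+=1
--             if i == l:
--                 nmatrix.append(c)
--     return nmatrix
--
-- def buildOVAlphaBeta(n, terminaison=""):
--     return setAlphaBeta(buildOV(n,"s",
--             "r" ,
--              strmap["lambda"],
--               strmap["rho"]), terminaison)
--
-- def buildCrond(n, terminaison=""):
--     return buildmatrix([],"Q" + terminaison,strmap["Qbar"] + terminaison,n,"func")
--
-- def buildDi(n, terminaison=""):
--     OV = buildOVAlphaBeta(n, terminaison)
--     Crondi = buildCrond(n, terminaison)
--
--     m = []
--     for x1,x2 in zip(OV,Crondi):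
--         l = "min" + str(x1[1:]) + "*" + str(x2)
--         m.append(l)
--     return m
-- ===== SOURCE B (Python) =====
-- def buildDi(n, terminaison=""):
--     # Direct enumeration: row k of the 2**n rows picks, at each position j+1
--     # (j = 0..n-1, position 1 varying fastest), alpha/Q when bit j of k is 0
--     # and beta/Q-bar when it is 1.
--     t = terminaison
--     sub = lambda nb: ''.join("\u2080\u2081\u2082\u2083\u2084\u2085\u2086\u2087\u2088\u2089"[ord(c) - 48] for c in str(nb))
--     out = []
--     for k in range(2 ** n):
--         alphas = []
--         q = ""
--         for j in range(n):
--             bit = (k >> j) & 1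
--             s = sub(j + 1)
--             alphas.append(("\u03B2" if bit else "\u03B1") + t + s)
--             q += ("Q\u0305" if bit else "Q") + t + s
--         out.append("min" + repr(tuple(alphas)) + "*" + q)
--     return out
-- ===== Notes on version B (the rewrite author's own statement) =====
-- stated objective: simpler
-- what changed: Replaces A's recursive-doubling buildmatrix (run three times) plus the zip/rebuild pipeline buildBi/buildOV/setAlphaBeta with a single direct enumeration of the 2^n rows, reading each row's alpha/beta and Q/Q-bar choices off the bits of the row index.
-- outside the precondition, e.g. on buildDi(0, ''): A does not finish within the time limit, B returns ['min()*']
import Mathlib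
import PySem

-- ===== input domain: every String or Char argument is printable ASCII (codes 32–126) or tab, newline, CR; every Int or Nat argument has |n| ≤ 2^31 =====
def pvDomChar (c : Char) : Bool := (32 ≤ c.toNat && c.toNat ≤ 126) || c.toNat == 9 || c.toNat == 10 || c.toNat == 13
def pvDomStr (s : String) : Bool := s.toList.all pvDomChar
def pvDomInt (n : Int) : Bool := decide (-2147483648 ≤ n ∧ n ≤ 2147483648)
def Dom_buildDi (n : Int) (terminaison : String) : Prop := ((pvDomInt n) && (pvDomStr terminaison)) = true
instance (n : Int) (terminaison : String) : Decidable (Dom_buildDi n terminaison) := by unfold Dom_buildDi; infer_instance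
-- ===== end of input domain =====

-- B replaces A's recursive-doubling matrix construction and three-stage zip/rebuild
-- pipeline by a single direct enumeration of the 2^n rows via the bits of a row index
-- (objective: simpler).


-- ===== SHARED HELPERS (both Pythons use str(nb) with the subscript table, and str()/repr() of tuples of strings) =====

-- subscript digit table (A's strmap restricted to the digit keys; exact for digit chars)
def digitSub (c : Char) : String :=
  if c = '0' then "₀" else if c = '1' then "₁" else if c = '2' then "₂"
  else if c = '3' then "₃" else if c = '4' then "₄" else if c = '5' then "₅"
  else if c = '6' then "₆" else if c = '7' then "₇" else if c = '8' then "₈" else "₉"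

-- ''.join(table[c] for c in str(nb)) — A's nbAsStrSub and Source B's sub compute exactly this
def nbAsStrSub (nb : Int) : String :=
  String.join ((PySem.Int.toStr nb).toList.map digitSub)

-- Python repr() of a str: exact for strings of printable-ASCII/tab/LF/CR and
-- printable non-ASCII characters (the only ones occurring here under Dom_)
def pyReprEsc (q c : Char) : List Char :=
  if c = '\\' then ['\\', '\\']
  else if c = q then ['\\', q]
  else if c = '\t' then ['\\', 't']
  else if c = '\n' then ['\\', 'n']
  else if c = '\r' then ['\\', 'r']
  else [c]

def pyReprStr (s : String) : String :=
  let cs := s.toList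
  let q : Char := if '\'' ∈ cs ∧ ¬ '"' ∈ cs then '"' else '\''
  String.ofList ([q] ++ cs.flatMap (pyReprEsc q) ++ [q])

-- Python str()/repr() of a tuple of strings (trailing comma for a 1-tuple)
def pyReprTuple (xs : List String) : String :=
  match xs with
  | [x] => "(" ++ pyReprStr x ++ ",)"
  | _ => "(" ++ String.intercalate ", " (xs.map pyReprStr) ++ ")"

-- ===== PORT A =====

-- buildmatrix with mode == "uplet" (tuples become List String); the final 'else []'
-- is a totality guard for i > n ∨ n < 1, where the Python recursion diverges (outside Pre_)
def buildmatrixU (matrix : List (List String)) (letter1 letter2 : String) (n i : Int) :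
    List (List String) :=
  let matrix :=
    if i = 1 then [[letter1 ++ nbAsStrSub 1], [letter2 ++ nbAsStrSub 1]]
    else
      let p := matrix.foldl
        (fun (acc : List (List String) × List (List String)) x =>
          (acc.1 ++ [x ++ [letter1 ++ nbAsStrSub i]],
           acc.2 ++ [x ++ [letter2 ++ nbAsStrSub i]])) ([], [])
      p.1 ++ p.2
  if i = n then matrix
  else if h : i < n then buildmatrixU matrix letter1 letter2 n (i + 1)
  else []
termination_by (n - i).toNat
decreasing_by omega

-- buildmatrix with mode == "func" (string concatenation); same totality guard
def buildmatrixF (matrix : List String) (letter1 letter2 : String) (n i : Int) :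
    List String :=
  let matrix :=
    if i = 1 then [letter1 ++ nbAsStrSub 1, letter2 ++ nbAsStrSub 1]
    else
      let p := matrix.foldl
        (fun (acc : List String × List String) x =>
          (acc.1 ++ [x ++ (letter1 ++ nbAsStrSub i)],
           acc.2 ++ [x ++ (letter2 ++ nbAsStrSub i)])) ([], [])
      p.1 ++ p.2
  if i = n then matrix
  else if h : i < n then buildmatrixF matrix letter1 letter2 n (i + 1)
  else []
termination_by (n - i).toNat
decreasing_by omega

def buildBi (n : Int) (x1 y1 x2 y2 : String) : List (List (String × String × String)) :=
  let m1 := buildmatrixU [] x1 y1 n 1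
  let m2 := buildmatrixU [] x2 y2 n 1
  (m1.zip m2).foldl
    (fun Bi p =>
      Bi ++ [(p.1.zip p.2).foldl (fun l q => l ++ [("max", q.1, q.2)]) []]) []

def buildOV (n : Int) (x1 y1 x2 y2 : String) : List (String × List (String × String × String)) :=
  (buildBi n x1 y1 x2 y2).foldl (fun OV x => OV ++ [("min", x)]) []

-- z[1][0] / z[2][0] read the first char (strings are nonempty here, so headD is exact);
-- z[1][1:] is the drop-1 slice (exact for a nonnegative index)
def setAlphaBeta (matrix : List (String × List (String × String × String)))
    (terminaison : String) : List (List String) :=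
  matrix.foldl
    (fun nmatrix x =>
      let l : Int := (x.2.length : Int)
      let st := x.2.foldl
        (fun (st : Int × List String × List (List String)) z =>
          let i := st.1
          let c := st.2.1
          let nm := st.2.2
          let c := if z.2.1.toList.headD ' ' = 's' ∧ z.2.2.toList.headD ' ' = 'λ' then
              c ++ ["α" ++ terminaison ++ String.ofList (z.2.1.toList.drop 1)] else c
          let c := if z.2.1.toList.headD ' ' = 'r' ∧ z.2.2.toList.headD ' ' = 'ρ' then
              c ++ ["β" ++ terminaison ++ String.ofList (z.2.1.toList.drop 1)] else c
          let i := i + 1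
          (i, c, if i = l then nm ++ [c] else nm))
        (0, ["min"], nmatrix)
      st.2.2)
    []

def buildOVAlphaBeta (n : Int) (terminaison : String) : List (List String) :=
  setAlphaBeta (buildOV n "s" "r" "λ" "ρ") terminaison

def buildCrond (n : Int) (terminaison : String) : List String :=
  buildmatrixF [] ("Q" ++ terminaison) ("Q̅" ++ terminaison) n 1

def buildDi (n : Int) (terminaison : String) : List String :=
  let OV := buildOVAlphaBeta n terminaison
  let Crondi := buildCrond n terminaison
  (OV.zip Crondi).foldl
    (fun m p => m ++ ["min" ++ pyReprTuple (p.1.drop 1) ++ "*" ++ p.2]) []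

-- ===== PORT B =====

-- Source B: one pass over range(2 ** n); bit j of k chooses the letter at position j + 1.
-- The guard 0 ≤ n is where Python's 2 ** n is an int (for n < 0 Source B raises, outside Pre_).
def buildDi_alt (n : Int) (terminaison : String) : List String :=
  if 0 ≤ n then
    (List.range (2 ^ n.toNat)).foldl
      (fun out k =>
        let st := (List.range n.toNat).foldl
          (fun (p : List String × String) (j : Nat) =>
            let bit := (k >>> j) % 2
            let s := nbAsStrSub ((j : Int) + 1)
            (p.1 ++ [(if bit = 1 then "β" else "α") ++ terminaison ++ s],
             p.2 ++ ((if bit = 1 then "Q̅" else "Q") ++ terminaison ++ s)))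
          ([], "")
        out ++ ["min" ++ pyReprTuple st.1 ++ "*" ++ st.2])
      []
  else []

-- ===== PRECONDITION & SPEC =====
-- Pre_ excludes n < 1, where A never returns: buildmatrix recurses with i ever
-- increasing past n (unbounded recursion / memory; observed killed for n = 0).
def Pre_buildDi (n : Int) (terminaison : String) : Prop := 1 ≤ n
instance (n : Int) (terminaison : String) : Decidable (Pre_buildDi n terminaison) := by
  unfold Pre_buildDi; infer_instance

def pvWitness_buildDi : Int × String := (2, "x")

def Spec_buildDi (n : Int) (terminaison : String) (out : List String) : Prop :=
  out = buildDi_alt n terminaison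
instance (n : Int) (terminaison : String) (out : List String) :
    Decidable (Spec_buildDi n terminaison out) := by unfold Spec_buildDi; infer_instance

-- ===== CLAIM (what is proved, stated in full; the proofs are below) =====
def Claim_equal_buildDi : Prop := ∀ (n : Int) (terminaison : String),
  Dom_buildDi n terminaison → Pre_buildDi n terminaison →
  Spec_buildDi n terminaison (buildDi n terminaison)

-- ===== LEMMAS AND PROOFS =====

-- canonical entry / row shapes shared by the two characterizations
def aEnt (t : String) (k j : Nat) : String :=
  (if (k >>> j) % 2 = 1 then "β" else "α") ++ t ++ nbAsStrSub ((j : Int) + 1)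
def qEnt (t : String) (k j : Nat) : String :=
  (if (k >>> j) % 2 = 1 then "Q̅" else "Q") ++ t ++ nbAsStrSub ((j : Int) + 1)
def rowU (l1 l2 : String) (m k : Nat) : List String :=
  (List.range m).map (fun j => (if (k >>> j) % 2 = 1 then l2 else l1) ++ nbAsStrSub ((j : Int) + 1))
def rowF (l1 l2 : String) (m k : Nat) : String :=
  ((List.range m).map (fun j => (if (k >>> j) % 2 = 1 then l2 else l1) ++ nbAsStrSub ((j : Int) + 1))).foldl (· ++ ·) ""

-- the doubling step of buildmatrix, iterated c times starting at position lo
def extU (l1 l2 : String) : Int → Nat → List (List String) → List (List String)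
  | _, 0, M => M
  | lo, c+1, M => extU l1 l2 (lo+1) c (M.map (· ++ [l1 ++ nbAsStrSub lo]) ++ M.map (· ++ [l2 ++ nbAsStrSub lo]))
def extF (l1 l2 : String) : Int → Nat → List String → List String
  | _, 0, M => M
  | lo, c+1, M => extF l1 l2 (lo+1) c (M.map (· ++ (l1 ++ nbAsStrSub lo)) ++ M.map (· ++ (l2 ++ nbAsStrSub lo)))

theorem foldl_pair_push {α β : Type} (f g : α → β) (l : List α) (a b : List β) :
    l.foldl (fun acc x => (acc.1 ++ [f x], acc.2 ++ [g x])) (a, b) = (a ++ l.map f, b ++ l.map g) := by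
  induction l generalizing a b with
  | nil => simp
  | cons x xs ih => simp [ih]

theorem buildmatrixU_eq (l1 l2 : String) : ∀ (c : Nat) (i : Int) (M : List (List String)), 2 ≤ i →
    buildmatrixU M l1 l2 (i + c) i = extU l1 l2 i (c+1) M := by
  intro c
  induction c with
  | zero =>
    intro i M hi
    rw [buildmatrixU]
    rw [if_neg (by omega : ¬ i = 1), if_pos (by omega : i = i + ((0:Nat):Int))]
    simp [foldl_pair_push, extU]
  | succ c ih =>
    intro i M hi
    rw [buildmatrixU]
    rw [if_neg (by omega : ¬ i = 1), if_neg (by omega : ¬ i = i + ((c+1 : Nat) : Int)),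
      dif_pos (by omega : i < i + ((c+1 : Nat) : Int))]
    have h2 : i + ((c+1 : Nat) : Int) = (i + 1) + (c : Int) := by push_cast; ring
    rw [h2, ih (i+1) _ (by omega)]
    simp [foldl_pair_push, extU]

theorem buildmatrixU_top (n : Int) (h : 1 ≤ n) (l1 l2 : String) (M : List (List String)) :
    buildmatrixU M l1 l2 n 1 = extU l1 l2 1 n.toNat [[]] := by
  rw [buildmatrixU]
  rw [if_pos rfl]
  by_cases h1 : n = 1
  · subst h1
    rw [if_pos rfl]
    simp [extU]
  · rw [if_neg (by omega : ¬ (1:Int) = n), dif_pos (by omega : (1:Int) < n)]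
    conv_lhs => rw [show n = (1+1) + ((n.toNat - 2 : Nat) : Int) by omega]
    rw [buildmatrixU_eq l1 l2 (n.toNat - 2) (1+1) _ (by omega)]
    rw [show n.toNat = (n.toNat - 2 + 1) + 1 by omega]
    simp [extU]

theorem bit_lo (j p k : Nat) (hj : j < p) : ((2^p + k) >>> j) % 2 = (k >>> j) % 2 := by
  simp only [Nat.shiftRight_eq_div_pow]
  rw [show 2^p = 2^j * 2^(p-j) by rw [← pow_add]; congr 1; omega]
  rw [Nat.mul_add_div (by positivity)]
  have : 2^(p-j) = 2 * 2^(p-j-1) := by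
    rw [← pow_succ']; congr 1; omega
  omega

theorem bit_hi (p k : Nat) (hk : k < 2^p) : ((2^p + k) >>> p) % 2 = 1 := by
  simp only [Nat.shiftRight_eq_div_pow]
  rw [Nat.add_comm, Nat.add_div_right _ (by positivity), Nat.div_eq_of_lt hk]

theorem bit_zero (p k : Nat) (hk : k < 2^p) : (k >>> p) % 2 = 0 := by
  simp [Nat.shiftRight_eq_div_pow, Nat.div_eq_of_lt hk]

theorem rowU_succ_lo (l1 l2 : String) (p k : Nat) (hk : k < 2^p) :
    rowU l1 l2 (p+1) k = rowU l1 l2 p k ++ [l1 ++ nbAsStrSub ((p : Int) + 1)] := by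
  simp [rowU, List.range_succ, bit_zero p k hk]

theorem rowU_succ_hi (l1 l2 : String) (p k : Nat) (hk : k < 2^p) :
    rowU l1 l2 (p+1) (2^p + k) = rowU l1 l2 p k ++ [l2 ++ nbAsStrSub ((p : Int) + 1)] := by
  simp only [rowU, List.range_succ, List.map_append, List.map_cons, List.map_nil]
  congr 1
  · exact List.map_congr_left (fun j hj => by
      rw [bit_lo j p _ (List.mem_range.mp hj)])
  · simp [bit_hi p k hk]

theorem extU_gen (l1 l2 : String) : ∀ (c p : Nat),
    extU l1 l2 ((p : Int) + 1) c ((List.range (2^p)).map (rowU l1 l2 p)) =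
      (List.range (2^(p+c))).map (rowU l1 l2 (p+c)) := by
  intro c
  induction c with
  | zero => intro p; simp [extU]
  | succ c ih =>
    intro p
    show extU l1 l2 ((p : Int) + 1) (c+1) _ = _
    rw [extU]
    have hstep : ((List.range (2^p)).map (rowU l1 l2 p)).map (· ++ [l1 ++ nbAsStrSub ((p:Int)+1)]) ++
        ((List.range (2^p)).map (rowU l1 l2 p)).map (· ++ [l2 ++ nbAsStrSub ((p:Int)+1)]) =
        (List.range (2^(p+1))).map (rowU l1 l2 (p+1)) := by
      rw [show 2^(p+1) = 2^p + 2^p by ring, List.range_add]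
      simp only [List.map_append, List.map_map]
      congr 1
      · exact List.map_congr_left (fun k hk => by
          simp only [Function.comp_apply]
          rw [rowU_succ_lo l1 l2 p k (List.mem_range.mp hk)])
      · exact List.map_congr_left (fun k hk => by
          simp only [Function.comp_apply]
          rw [rowU_succ_hi l1 l2 p k (List.mem_range.mp hk)])
    rw [hstep, show ((p : Int) + 1 + 1) = (((p+1 : Nat) : Int) + 1) by push_cast; ring,
      ih (p+1), show p + 1 + c = p + (c+1) by ring]

theorem buildmatrixF_eq (l1 l2 : String) : ∀ (c : Nat) (i : Int) (M : List String), 2 ≤ i →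
    buildmatrixF M l1 l2 (i + c) i = extF l1 l2 i (c+1) M := by
  intro c
  induction c with
  | zero =>
    intro i M hi
    rw [buildmatrixF]
    rw [if_neg (by omega : ¬ i = 1), if_pos (by omega : i = i + ((0:Nat):Int))]
    simp [foldl_pair_push, extF]
  | succ c ih =>
    intro i M hi
    rw [buildmatrixF]
    rw [if_neg (by omega : ¬ i = 1), if_neg (by omega : ¬ i = i + ((c+1 : Nat) : Int)),
      dif_pos (by omega : i < i + ((c+1 : Nat) : Int))]
    have h2 : i + ((c+1 : Nat) : Int) = (i + 1) + (c : Int) := by push_cast; ring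
    rw [h2, ih (i+1) _ (by omega)]
    simp [foldl_pair_push, extF]

theorem buildmatrixF_top (n : Int) (h : 1 ≤ n) (l1 l2 : String) (M : List String) :
    buildmatrixF M l1 l2 n 1 = extF l1 l2 1 n.toNat [""] := by
  rw [buildmatrixF]
  rw [if_pos rfl]
  by_cases h1 : n = 1
  · subst h1
    rw [if_pos rfl]
    simp [extF]
  · rw [if_neg (by omega : ¬ (1:Int) = n), dif_pos (by omega : (1:Int) < n)]
    conv_lhs => rw [show n = (1+1) + ((n.toNat - 2 : Nat) : Int) by omega]
    rw [buildmatrixF_eq l1 l2 (n.toNat - 2) (1+1) _ (by omega)]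
    rw [show n.toNat = (n.toNat - 2 + 1) + 1 by omega]
    simp [extF]

theorem rowF_succ_lo (l1 l2 : String) (p k : Nat) (hk : k < 2^p) :
    rowF l1 l2 (p+1) k = rowF l1 l2 p k ++ (l1 ++ nbAsStrSub ((p : Int) + 1)) := by
  simp [rowF, List.range_succ, bit_zero p k hk]

theorem rowF_succ_hi (l1 l2 : String) (p k : Nat) (hk : k < 2^p) :
    rowF l1 l2 (p+1) (2^p + k) = rowF l1 l2 p k ++ (l2 ++ nbAsStrSub ((p : Int) + 1)) := by
  simp only [rowF, List.range_succ, List.map_append, List.map_cons, List.map_nil,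
    List.foldl_append, List.foldl_cons, List.foldl_nil]
  rw [bit_hi p k hk]
  congr 2
  exact List.map_congr_left (fun j hj => by rw [bit_lo j p _ (List.mem_range.mp hj)])

theorem extF_gen (l1 l2 : String) : ∀ (c p : Nat),
    extF l1 l2 ((p : Int) + 1) c ((List.range (2^p)).map (rowF l1 l2 p)) =
      (List.range (2^(p+c))).map (rowF l1 l2 (p+c)) := by
  intro c
  induction c with
  | zero => intro p; simp [extF]
  | succ c ih =>
    intro p
    show extF l1 l2 ((p : Int) + 1) (c+1) _ = _
    rw [extF]
    have hstep : ((List.range (2^p)).map (rowF l1 l2 p)).map (· ++ (l1 ++ nbAsStrSub ((p:Int)+1))) ++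
        ((List.range (2^p)).map (rowF l1 l2 p)).map (· ++ (l2 ++ nbAsStrSub ((p:Int)+1))) =
        (List.range (2^(p+1))).map (rowF l1 l2 (p+1)) := by
      rw [show 2^(p+1) = 2^p + 2^p by ring, List.range_add]
      simp only [List.map_append, List.map_map]
      congr 1
      · exact List.map_congr_left (fun k hk => by
          simp only [Function.comp_apply]
          rw [rowF_succ_lo l1 l2 p k (List.mem_range.mp hk)])
      · exact List.map_congr_left (fun k hk => by
          simp only [Function.comp_apply]
          rw [rowF_succ_hi l1 l2 p k (List.mem_range.mp hk)])
    rw [hstep, show ((p : Int) + 1 + 1) = (((p+1 : Nat) : Int) + 1) by push_cast; ring,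
      ih (p+1), show p + 1 + c = p + (c+1) by ring]

theorem extU_all (l1 l2 : String) (m : Nat) :
    extU l1 l2 1 m [[]] = (List.range (2^m)).map (rowU l1 l2 m) := by
  have h := extU_gen l1 l2 m 0
  simpa [rowU] using h

theorem extF_all (l1 l2 : String) (m : Nat) :
    extF l1 l2 1 m [""] = (List.range (2^m)).map (rowF l1 l2 m) := by
  have h := extF_gen l1 l2 m 0
  simpa [rowF] using h

theorem buildBi_char (n : Int) (h : 1 ≤ n) (x1 y1 x2 y2 : String) :
    buildBi n x1 y1 x2 y2 = (List.range (2^n.toNat)).map (fun (k : Nat) =>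
      (List.range n.toNat).map (fun (j : Nat) => (("max",
        (if (k >>> j) % 2 = 1 then y1 else x1) ++ nbAsStrSub ((j:Int)+1),
        (if (k >>> j) % 2 = 1 then y2 else x2) ++ nbAsStrSub ((j:Int)+1)) : String × String × String))) := by
  show ((buildmatrixU [] x1 y1 n 1).zip (buildmatrixU [] x2 y2 n 1)).foldl _ [] = _
  rw [buildmatrixU_top n h, buildmatrixU_top n h, extU_all, extU_all, List.zip_map',
    PySem.List.foldl_append_singleton_eq_map, List.map_map, List.nil_append]
  refine List.map_congr_left (fun k _ => ?_)
  simp only [Function.comp_apply, rowU, List.zip_map', PySem.List.foldl_append_singleton_eq_map,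
    List.map_map, List.nil_append]
  rfl

theorem buildOV_char (n : Int) (h : 1 ≤ n) (x1 y1 x2 y2 : String) :
    buildOV n x1 y1 x2 y2 = (List.range (2^n.toNat)).map (fun k => (("min",
      (List.range n.toNat).map (fun (j : Nat) => (("max",
        (if (k >>> j) % 2 = 1 then y1 else x1) ++ nbAsStrSub ((j:Int)+1),
        (if (k >>> j) % 2 = 1 then y2 else x2) ++ nbAsStrSub ((j:Int)+1)) : String × String × String))) :
        String × List (String × String × String))) := by
  show (buildBi n x1 y1 x2 y2).foldl _ [] = _
  rw [buildBi_char n h, PySem.List.foldl_append_singleton_eq_map, List.map_map, List.nil_append]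
  rfl

-- the counter-and-append loop of setAlphaBeta, in canonical form
theorem abFold (E : Nat → String) (L : Int) :
    ∀ (l : List Nat) (i0 : Int) (c0 : List String) (nm0 : List (List String)),
    i0 + l.length = L → l ≠ [] →
    l.foldl (fun st j =>
        (st.1 + 1, st.2.1 ++ [E j], if st.1 + 1 = L then st.2.2 ++ [st.2.1 ++ [E j]] else st.2.2))
      (i0, c0, nm0) = (L, c0 ++ l.map E, nm0 ++ [c0 ++ l.map E]) := by
  intro l
  induction l with
  | nil => simp
  | cons j l ih =>
    intro i0 c0 nm0 hlen _
    by_cases hl : l = []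
    · subst hl
      simp at hlen
      simp [hlen]
    · have hlpos : 0 < l.length := List.length_pos_iff.mpr hl
      simp only [List.foldl_cons]
      rw [if_neg (by simp at hlen; omega)]
      rw [ih (i0+1) (c0 ++ [E j]) nm0 (by simp at hlen ⊢; omega) hl]
      simp

theorem str_toList_r : ("r" : String).toList = ['r'] := rfl
theorem str_toList_s : ("s" : String).toList = ['s'] := rfl
theorem str_toList_lam : ("λ" : String).toList = ['λ'] := rfl
theorem str_toList_rho : ("ρ" : String).toList = ['ρ'] := rfl

theorem setAB_char (n : Int) (h : 1 ≤ n) (t : String) :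
    buildOVAlphaBeta n t = (List.range (2^n.toNat)).map (fun (k : Nat) =>
      "min" :: (List.range n.toNat).map (aEnt t k)) := by
  have hm : 1 ≤ n.toNat := by omega
  show setAlphaBeta (buildOV n "s" "r" "λ" "ρ") t = _
  rw [buildOV_char n h]
  simp only [setAlphaBeta]
  rw [List.foldl_map]
  rw [PySem.List.foldl_congr_mem _ _
    (fun nm (k : Nat) => nm ++ ["min" :: (List.range n.toNat).map (aEnt t k)]) []
    (fun acc k _ => ?_)]
  · rw [PySem.List.foldl_append_singleton_eq_map, List.nil_append]
  · -- one row: the counter loop appends exactly the alpha/beta entries and pushes the row once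
    simp only
    rw [List.foldl_map]
    rw [PySem.List.foldl_congr_mem _ _
      (fun (st : Int × List String × List (List String)) (j : Nat) =>
        (st.1 + 1, st.2.1 ++ [aEnt t k j],
          if st.1 + 1 = ((List.range n.toNat).map (fun (j : Nat) => (("max",
            (if (k >>> j) % 2 = 1 then "r" else "s") ++ nbAsStrSub ((j:Int)+1),
            (if (k >>> j) % 2 = 1 then "ρ" else "λ") ++ nbAsStrSub ((j:Int)+1)) : String × String × String))).length
          then st.2.2 ++ [st.2.1 ++ [aEnt t k j]] else st.2.2))
      (0, ["min"], acc)
      (fun st j hj => ?_)]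
    · rw [abFold (aEnt t k) _ (List.range n.toNat) 0 ["min"] acc (by simp)
        (by simpa using (by omega : n.toNat ≠ 0))]
      simp
    · -- one entry: exactly one of the two branches fires
      by_cases hb : (k >>> j) % 2 = 1 <;>
        simp [aEnt, hb, String.ofList_toList, String.toList_append, str_toList_r,
          str_toList_s, str_toList_lam, str_toList_rho]

theorem buildDi_char (n : Int) (h : 1 ≤ n) (t : String) :
    buildDi n t = (List.range (2^n.toNat)).map (fun (k : Nat) =>
      "min" ++ pyReprTuple ((List.range n.toNat).map (aEnt t k)) ++ "*" ++
        rowF ("Q" ++ t) ("Q̅" ++ t) n.toNat k) := by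
  simp only [buildDi, buildCrond]
  rw [setAB_char n h, buildmatrixF_top n h, extF_all, List.zip_map',
    PySem.List.foldl_append_singleton_eq_map, List.map_map, List.nil_append]
  refine List.map_congr_left (fun k _ => ?_)
  simp

theorem foldl_pair_push_str {α : Type} (f g : α → String) (l : List α) (a : List String) (b : String) :
    l.foldl (fun p x => (p.1 ++ [f x], p.2 ++ g x)) (a, b) = (a ++ l.map f, (l.map g).foldl (· ++ ·) b) := by
  induction l generalizing a b with
  | nil => simp
  | cons x xs ih => simp [ih]

theorem buildDi_alt_char (n : Int) (h : 1 ≤ n) (t : String) :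
    buildDi_alt n t = (List.range (2^n.toNat)).map (fun (k : Nat) =>
      "min" ++ pyReprTuple ((List.range n.toNat).map (aEnt t k)) ++ "*" ++
        ((List.range n.toNat).map (qEnt t k)).foldl (· ++ ·) "") := by
  simp only [buildDi_alt, if_pos (by omega : (0:Int) ≤ n)]
  rw [PySem.List.foldl_congr_mem _ _
    (fun out (k : Nat) => out ++ ["min" ++ pyReprTuple ((List.range n.toNat).map (aEnt t k)) ++ "*" ++
      ((List.range n.toNat).map (qEnt t k)).foldl (· ++ ·) ""]) []
    (fun acc k _ => ?_)]
  · rw [PySem.List.foldl_append_singleton_eq_map, List.nil_append]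
  · simp only
    rw [foldl_pair_push_str]
    simp
    rfl

theorem rowF_eq_qEnt (t : String) (m k : Nat) :
    rowF ("Q" ++ t) ("Q̅" ++ t) m k = ((List.range m).map (qEnt t k)).foldl (· ++ ·) "" := by
  unfold rowF
  congr 1
  refine List.map_congr_left (fun j _ => ?_)
  by_cases hb : (k >>> j) % 2 = 1 <;> simp [qEnt, hb, String.append_assoc]

-- ===== VERDICT =====
theorem buildDi_spec : Claim_equal_buildDi := by
  intro n t _ hpre
  show buildDi n t = buildDi_alt n t
  rw [buildDi_char n hpre t, buildDi_alt_char n hpre t]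
  refine List.map_congr_left (fun k _ => ?_)
  rw [rowF_eq_qEnt]
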